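-- pv_equiv track=rewrite | github.com/SymphonyPy/Data_Structure | Huffman.py | cal_count_freq
-- ===== SOURCE A (Python) =====
-- def cal_count_freq(content):
--     chars = []
--     chars_freqs = []
--     for i in range(0, len(content)):
--         if content[i] in chars:
--             pass
--         else:
--             chars.append(content[i])
--             char_freq = (content[i], content.count(content[i]))
--             chars_freqs.append(char_freq)
--     return chars_freqs
-- ===== SOURCE B (Python) =====
-- def cal_count_freq(content):
--     # Repeatedly peel off the current leading character: filter out all its
--     # occurrences and record how many the filter removed; no seen-set and no
--     # counting scan is needed, the count is the length difference.
--     rest = list(content)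
--     result = []
--     while rest:
--         ch = rest[0]
--         remaining = [c for c in rest if c != ch]
--         result.append((ch, len(rest) - len(remaining)))
--         rest = remaining
--     return result
-- ===== Notes on version B (the rewrite author's own statement) =====
-- stated objective: alternative
-- what changed: Instead of A's seen-list membership test plus content.count() rescans, B repeatedly peels the leading character off a shrinking working list, emitting (char, count) as the length drop caused by filtering that character out.
import Mathlib
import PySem

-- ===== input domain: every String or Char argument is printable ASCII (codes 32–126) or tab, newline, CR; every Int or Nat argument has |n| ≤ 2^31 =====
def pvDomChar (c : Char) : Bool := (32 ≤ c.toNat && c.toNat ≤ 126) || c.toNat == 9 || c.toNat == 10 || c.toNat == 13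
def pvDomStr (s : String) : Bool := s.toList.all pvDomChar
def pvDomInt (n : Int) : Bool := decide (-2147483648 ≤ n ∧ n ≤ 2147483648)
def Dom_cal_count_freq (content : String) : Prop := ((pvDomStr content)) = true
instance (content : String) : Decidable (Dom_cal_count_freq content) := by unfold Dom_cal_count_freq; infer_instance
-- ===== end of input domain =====

-- B replaces A's seen-list + content.count() rescanning by repeatedly peeling the leading
-- character off a shrinking working list (count = length drop of the filter); alternative
-- decomposition, no speed claim.

-- ===== PORT A =====
-- A's loop body: 'if content[i] in chars: pass ; else: append char, append (char, content.count(char))'.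
-- content.count(content[i]) is PySem.Str.count content (one-char string), which is by definition
-- PySem.Chars.count content.toList [c].
def pvStepA (cs : List Char) (st : List Char × List (String × Int)) (c : Char) :
    List Char × List (String × Int) :=
  if st.1.contains c then st
  else (st.1 ++ [c], st.2 ++ [(String.ofList [c], (PySem.Chars.count cs [c] : Int))])

-- 'for i in range(0, len(content))' reading content[i]; the index is always in range inside the
-- loop, so the total pyGetD (arbitrary default) is exact here.
def cal_count_freq (content : String) : List (String × Int) :=
  let cs := content.toList
  ((PySem.List.pyRange 0 (PySem.List.len cs)).foldl
      (fun st i => pvStepA cs st (PySem.List.pyGetD cs i ' ')) ([], [])).2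

-- ===== PORT B =====
-- B's while loop: ch = rest[0]; remaining = [c for c in rest if c != ch];
-- append (ch, len(rest) - len(remaining)); rest = remaining.
def pvPeel : List Char → List (String × Int)
  | [] => []
  | ch :: t =>
    let rest := ch :: t
    let remaining := rest.filter (fun c => c ≠ ch)
    (String.ofList [ch], ((rest.length : Int) - (remaining.length : Int))) :: pvPeel remaining
termination_by l => l.length
decreasing_by
  simp only [List.filter]
  simp
  exact List.length_filter_le _ _

def cal_count_freq_alt (content : String) : List (String × Int) :=
  pvPeel content.toList

-- ===== PRECONDITION & SPEC =====
def Spec_cal_count_freq (content : String) (out : List (String × Int)) : Prop := out = cal_count_freq_alt content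
instance (content : String) (out : List (String × Int)) : Decidable (Spec_cal_count_freq content out) := by unfold Spec_cal_count_freq; infer_instance

-- ===== CLAIM (what is proved, stated in full; the proofs are below) =====
def Claim_equal_cal_count_freq : Prop := ∀ (content : String), Dom_cal_count_freq content → Spec_cal_count_freq content (cal_count_freq content)

-- ===== LEMMAS AND PROOFS =====

-- Python's s.count(sub) for a one-character sub is the character count.
lemma pvCountGo (c : Char) : ∀ (fuel : Nat) (l : List Char) (acc : Nat),
    l.length ≤ fuel → PySem.Chars.count.go [c] fuel l acc = acc + l.count c := by
  intro fuel
  induction fuel with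
  | zero =>
    intro l acc h
    cases l with
    | nil => simp [PySem.Chars.count.go]
    | cons x t => simp at h
  | succ n ih =>
    intro l acc h
    cases l with
    | nil => simp [PySem.Chars.count.go]
    | cons x t =>
      have ht : t.length ≤ n := by simpa using h
      simp only [PySem.Chars.count.go, List.isPrefixOf, List.count_cons]
      by_cases hcx : c = x
      · subst hcx
        simp [ih t (acc + 1) ht]
        omega
      · simp [hcx, Ne.symm hcx, ih t acc ht]

lemma pvCountSingleton (cs : List Char) (c : Char) :
    PySem.Chars.count cs [c] = cs.count c := by
  simp [PySem.Chars.count, pvCountGo c cs.length cs 0 le_rfl]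

-- Count by length difference: filtering out a character removes exactly count-many elements.
lemma pvLenSub (x : Char) : ∀ (r : List Char),
    (r.length : Int) - ((r.filter (fun c => c ≠ x)).length : Int) = r.count x := by
  intro r
  induction r with
  | nil => simp
  | cons y t ih =>
    have hle := List.length_filter_le (fun c => decide (c ≠ x)) t
    simp only [ne_eq, decide_not] at ih hle ⊢
    by_cases h : y = x
    · subst h; simp; omega
    · simp [h]; omega

-- Loop invariant: running A's fold over the remaining suffix l, where the already-processed
-- prefix is pre and seen has the same members as pre, produces acc followed by B's peel of
-- l with the seen characters filtered out.
lemma pvMain (cs : List Char) :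
    ∀ (l pre seen : List Char) (acc : List (String × Int)),
      cs = pre ++ l →
      (∀ c, seen.contains c = pre.contains c) →
      (l.foldl (pvStepA cs) (seen, acc)).2
        = acc ++ pvPeel (l.filter (fun c => !seen.contains c)) := by
  intro l
  induction l with
  | nil => intro pre seen acc _ _; simp [pvPeel]
  | cons x t ih =>
    intro pre seen acc hcs hseen
    have hmem : ∀ c, c ∈ seen ↔ c ∈ pre := by
      intro c; have := hseen c; simpa [List.contains_eq_mem] using this
    simp only [List.foldl_cons]
    by_cases hx : x ∈ seen
    · -- already seen: A skips the character, B's filter drops it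
      have hxb : seen.contains x = true := by simpa [List.contains_eq_mem] using hx
      have hstep : pvStepA cs (seen, acc) x = (seen, acc) := by simp [pvStepA, hx]
      rw [hstep, List.filter_cons_of_neg (by simp [hx])]
      refine ih (pre ++ [x]) seen acc (by simpa using hcs) ?_
      intro c
      simp only [List.contains_eq_mem, List.mem_append, List.mem_singleton]
      rcases eq_or_ne c x with rfl | hc
      · simp [hx]
      · simp [hc, hmem c]
    · -- new character
      have hxb : seen.contains x = false := by simpa [List.contains_eq_mem] using hx
      have hxp : x ∉ pre := fun h => hx ((hmem x).mpr h)
      have hstep : pvStepA cs (seen, acc) x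
          = (seen ++ [x], acc ++ [(String.ofList [x], (PySem.Chars.count cs [x] : Int))]) := by
        simp [pvStepA, hx]
      rw [hstep, List.filter_cons_of_pos (by simp [hx])]
      set r := t.filter (fun c => !seen.contains c) with hr
      rw [pvPeel]
      -- the peel's filter drops the head and, on the tail, equals filtering by seen ++ [x]
      have hhead : (x :: r).filter (fun c => c ≠ x) = r.filter (fun c => c ≠ x) := by
        refine List.filter_cons_of_neg (by simp)
      have hrest : (x :: r).filter (fun c => c ≠ x)
          = t.filter (fun c => !(seen ++ [x]).contains c) := by
        rw [hhead, hr, List.filter_filter]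
        refine List.filter_congr ?_
        intro a _
        by_cases h1 : a ∈ seen <;> by_cases h2 : a = x <;>
          simp [h1, h2, List.contains_eq_mem]
      -- the rescanned count equals the peel's length difference
      have hcount : (PySem.Chars.count cs [x] : Int)
          = ((x :: r).length : Int) - (((x :: r).filter (fun c => c ≠ x)).length : Int) := by
        rw [pvLenSub x (x :: r), pvCountSingleton, hcs]
        have hrc : r.count x = t.count x := by
          rw [hr]; exact List.count_filter (by simp [hx])
        simp [List.count_append, List.count_eq_zero.mpr hxp, hrc]
      rw [hcount, hrest]
      have htail := ih (pre ++ [x]) (seen ++ [x]) 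
        (acc ++ [(String.ofList [x],
          ((x :: r).length : Int) - (((x :: r).filter (fun c => c ≠ x)).length : Int))])
        (by simpa using hcs) ?_
      · rw [hrest] at htail
        rw [htail]
        simp
      · intro c
        simp only [List.contains_eq_mem, List.mem_append, List.mem_singleton]
        simp [hmem c]

-- ===== VERDICT (by name: the statement is the Claim_ definition above) =====
theorem cal_count_freq_spec : Claim_equal_cal_count_freq := by
  intro content _
  unfold Spec_cal_count_freq
  simp only [cal_count_freq, cal_count_freq_alt]
  have h1 := PySem.List.foldl_pyRange_zero_pyGetD content.toList ' '
      (pvStepA content.toList) (([], []) : List Char × List (String × Int))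
  rw [h1, pvMain content.toList content.toList [] [] [] rfl (by simp)]
  simp
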